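-- pv_equiv track=rewrite | github.com/dseditor/ComfyUI-ListHelper | nodes.py | _split_with_delimiter
-- ===== SOURCE A (Python) =====
-- def _split_with_delimiter(text, delimiter):
--     """輔助方法：用一般字符串分割並保留分隔符"""
--     if delimiter not in text:
--         return [text] if text.strip() else []
--
--     parts = text.split(delimiter)
--     result = []
--
--     for i, part in enumerate(parts):
--         if i == 0:
--             # 第一個部分
--             if part.strip():
--                 result.append(part)
--         else:
--             # 其他部分都加上分隔符
--             combined = delimiter + part
--             if combined.strip():
--                 result.append(combined)
--
--     return result
-- ===== SOURCE B (Python) =====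
-- def _split_with_delimiter(text, delimiter):
--     # Single forward scan with str.find: cut the text at each non-overlapping
--     # occurrence of the delimiter (so every later segment starts with it),
--     # then drop blank segments; no split()/enumerate pass, uniform base case.
--     k = text.find(delimiter)
--     if k == -1:
--         return [text] if text.strip() else []
--     segs = [text[:k]]
--     s = text[k:]  # always starts with the delimiter
--     j = s.find(delimiter, len(delimiter))
--     while j != -1:
--         segs.append(s[:j])
--         s = s[j:]
--         j = s.find(delimiter, len(delimiter))
--     segs.append(s)
--     return [x for x in segs if x.strip()]
-- ===== Notes on version B (the rewrite author's own statement) =====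
-- stated objective: alternative
-- what changed: B replaces A's split()+enumerate pass with its first-part special case by a single str.find scan that cuts the text directly at each non-overlapping delimiter occurrence (so later segments carry their delimiter by construction) and filters blank segments once at the end.
import Mathlib
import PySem

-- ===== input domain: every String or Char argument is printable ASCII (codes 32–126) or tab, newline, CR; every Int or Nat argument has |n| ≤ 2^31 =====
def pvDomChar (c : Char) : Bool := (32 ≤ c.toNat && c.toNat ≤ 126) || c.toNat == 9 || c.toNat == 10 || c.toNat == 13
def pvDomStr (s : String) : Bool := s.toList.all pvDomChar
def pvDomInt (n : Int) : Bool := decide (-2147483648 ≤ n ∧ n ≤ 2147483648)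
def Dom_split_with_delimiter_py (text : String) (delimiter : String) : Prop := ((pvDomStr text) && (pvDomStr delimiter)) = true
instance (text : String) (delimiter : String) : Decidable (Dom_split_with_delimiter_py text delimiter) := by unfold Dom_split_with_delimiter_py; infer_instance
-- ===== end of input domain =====

-- B replaces A's split()+enumerate pass (with its first-part special case) by a single str.find
-- scan that cuts the text at each delimiter occurrence and filters blanks once (objective: alternative).

-- ===== PORT A =====
-- A: if delimiter not in text: [text] if text.strip() else []; else split, keep part 0 bare,
-- prefix the others with the delimiter, append each if its strip() is nonempty.
def split_with_delimiter_py (text : String) (delimiter : String) : List String :=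
  let t := text.toList
  let d := delimiter.toList
  if PySem.Chars.isIn d t = false then
    (if PySem.Chars.strip t ≠ [] then [text] else [])
  else
    match PySem.Chars.split? t d with
    | none => []   -- text.split('') raises ValueError; excluded by Pre_
    | some parts =>
      parts.zipIdx.foldl (fun res pi =>
        if pi.2 = 0 then
          (if PySem.Chars.strip pi.1 ≠ [] then res ++ [String.ofList pi.1] else res)
        else
          (let combined := d ++ pi.1
           if PySem.Chars.strip combined ≠ [] then res ++ [String.ofList combined] else res)) []

-- ===== PORT B =====
-- B's while loop collecting segments; the fuel (initially the suffix length) only makes the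
-- recursion total in Lean — with a nonempty delimiter the loop stops before it runs out.
def pvTailLoop (d : List Char) : Nat → List Char → List (List Char) → List (List Char)
  | 0, s, acc => acc ++ [s]
  | fuel+1, s, acc =>
    let j := PySem.Chars.findFrom s d (d.length)
    if j = -1 then acc ++ [s]
    else pvTailLoop d fuel (s.drop j.toNat) (acc ++ [s.take j.toNat])

def split_with_delimiter_py_alt (text : String) (delimiter : String) : List String :=
  let t := text.toList
  let d := delimiter.toList
  let k := PySem.Chars.find t d
  if k = -1 then
    (if PySem.Chars.strip t ≠ [] then [text] else [])
  else
    let s := t.drop k.toNat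
    let segs := pvTailLoop d s.length s [t.take k.toNat]
    (segs.filter (fun x => !(PySem.Chars.strip x).isEmpty)).map String.ofList

-- ===== PRECONDITION & SPEC =====
-- Pre_ excludes only delimiter = "": there A raises ValueError (text.split('')), since '' in text is always true.
def Pre_split_with_delimiter_py (text : String) (delimiter : String) : Prop := delimiter ≠ ""
instance (text : String) (delimiter : String) : Decidable (Pre_split_with_delimiter_py text delimiter) := by unfold Pre_split_with_delimiter_py; infer_instance
def pvWitness_split_with_delimiter_py : String × String := ("a, b,, c", ",")

def Spec_split_with_delimiter_py (text : String) (delimiter : String) (out : List String) : Prop := out = split_with_delimiter_py_alt text delimiter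
instance (text : String) (delimiter : String) (out : List String) : Decidable (Spec_split_with_delimiter_py text delimiter out) := by unfold Spec_split_with_delimiter_py; infer_instance

-- ===== CLAIM (what is proved, stated in full; the proofs are below) =====
def Claim_equal_split_with_delimiter_py : Prop := ∀ (text : String) (delimiter : String), Dom_split_with_delimiter_py text delimiter → Pre_split_with_delimiter_py text delimiter → Spec_split_with_delimiter_py text delimiter (split_with_delimiter_py text delimiter)

-- ===== LEMMAS AND PROOFS =====

lemma pvConsHeadITail {α : Type} [Inhabited α] (X : List α) (h : X ≠ []) : X.headI :: X.tail = X := by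
  cases X with
  | nil => exact absurd rfl h
  | cons a l => rfl

-- Reference splitter: the fuel-free recursive form of Python's str.split(sep).
def pvSplit (d : List Char) (l : List Char) : List (List Char) :=
  if hl : l = [] then [[]]
  else if hp : d.isPrefixOf l = true ∧ d ≠ [] then
    [] :: pvSplit d (l.drop d.length)
  else
    (l.head hl :: (pvSplit d l.tail).headI) :: (pvSplit d l.tail).tail
termination_by l.length
decreasing_by
  · have h1 : 0 < d.length := List.length_pos_iff.mpr hp.2
    have h2 : 0 < l.length := List.length_pos_iff.mpr hl
    simp [List.length_drop]; omega
  · cases l with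
    | nil => exact absurd rfl hl
    | cons a l => simp

lemma pvSplit_ne_nil (d l : List Char) : pvSplit d l ≠ [] := by
  rw [pvSplit]
  split_ifs <;> simp

lemma pvSplit_nil (d : List Char) : pvSplit d [] = [[]] := by
  rw [pvSplit]; simp

lemma pvSplit_pos (d l : List Char) (hl : l ≠ []) (hp : d.isPrefixOf l = true) (hd : d ≠ []) :
    pvSplit d l = [] :: pvSplit d (l.drop d.length) := by
  rw [pvSplit, dif_neg hl, dif_pos ⟨hp, hd⟩]

lemma pvSplit_neg (d : List Char) (c : Char) (rest : List Char) (hp : ¬ d.isPrefixOf (c :: rest) = true) :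
    pvSplit d (c :: rest) = (c :: (pvSplit d rest).headI) :: (pvSplit d rest).tail := by
  rw [pvSplit, dif_neg (by simp), dif_neg (fun hc => hp hc.1)]
  rfl

lemma pvSplit_go (d : List Char) (hd : d ≠ []) :
    ∀ fuel l cur acc, l.length ≤ fuel →
      PySem.Chars.splitOn.go d fuel l cur acc =
        acc.reverse ++ (cur.reverse ++ (pvSplit d l).headI) :: (pvSplit d l).tail := by
  intro fuel
  induction fuel with
  | zero =>
    intro l cur acc hlen
    have hl : l = [] := List.eq_nil_of_length_eq_zero (Nat.le_zero.mp hlen)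
    subst hl
    simp [PySem.Chars.splitOn.go, pvSplit_nil]
  | succ fuel ih =>
    intro l cur acc hlen
    cases l with
    | nil => simp [PySem.Chars.splitOn.go, pvSplit_nil]
    | cons c rest =>
      rw [PySem.Chars.splitOn.go]
      by_cases hp : d.isPrefixOf (c :: rest) = true
      · rw [if_pos hp]
        have hdl : 0 < d.length := List.length_pos_iff.mpr hd
        have hlen' : ((c :: rest).drop d.length).length ≤ fuel := by
          simp only [List.length_drop, List.length_cons] at *
          omega
        rw [ih _ [] _ hlen', pvSplit_pos d _ (by simp) hp hd]
        have hne := pvSplit_ne_nil d ((c :: rest).drop d.length)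
        rw [← pvConsHeadITail _ hne]
        simp
      · rw [if_neg hp]
        rw [ih rest (c :: cur) acc (by simp at hlen ⊢; omega), pvSplit_neg d c rest hp]
        simp

lemma pvSplit_eq_splitOn (d : List Char) (hd : d ≠ []) (l : List Char) :
    PySem.Chars.splitOn l d = pvSplit d l := by
  show PySem.Chars.splitOn.go d (l.length + 1) l [] [] = _
  rw [pvSplit_go d hd (l.length + 1) l [] [] (by omega)]
  simpa using pvConsHeadITail _ (pvSplit_ne_nil d l)

lemma pvSplit_no_occ (d : List Char) (hd : d ≠ []) :
    ∀ l : List Char, (∀ i, ¬ d <+: l.drop i) → pvSplit d l = [l] := by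
  intro l
  induction l with
  | nil => intro _; exact pvSplit_nil d
  | cons c rest ih =>
    intro h
    have h0 : ¬ d <+: (c :: rest) := by simpa using h 0
    rw [pvSplit_neg d c rest (fun hc => h0 ((PySem.Chars.startswith_iff _ _).mp hc))]
    rw [ih (fun i => by simpa using h (i + 1))]
    simp

lemma pvSplit_occ (d : List Char) (hd : d ≠ []) :
    ∀ (k : Nat) (l : List Char), d <+: l.drop k → (∀ i, i < k → ¬ d <+: l.drop i) →
      pvSplit d l = l.take k :: pvSplit d (l.drop (k + d.length)) := by
  intro k
  induction k with
  | zero =>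
    intro l hk _
    simp only [List.drop_zero] at hk
    have hl : l ≠ [] := by
      rintro rfl
      exact hd (List.prefix_nil.mp hk)
    rw [pvSplit_pos d l hl ((PySem.Chars.startswith_iff l d).mpr hk) hd]
    simp
  | succ k ih =>
    intro l hk hmin
    cases l with
    | nil =>
      simp only [List.drop_nil] at hk
      exact absurd (List.prefix_nil.mp hk) hd
    | cons c rest =>
      have h0 : ¬ d <+: (c :: rest) := by simpa using hmin 0 (Nat.succ_pos k)
      rw [pvSplit_neg d c rest (fun hc => h0 ((PySem.Chars.startswith_iff _ _).mp hc))]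
      rw [ih rest (by simpa using hk) (fun i hi => by simpa using hmin (i + 1) (by omega))]
      simp [show k + 1 + d.length = k + d.length + 1 from by omega]

lemma pvTailLoop_eq (d : List Char) (hd : d ≠ []) :
    ∀ fuel s acc, d <+: s → s.length ≤ fuel →
      pvTailLoop d fuel s acc = acc ++ (pvSplit d (s.drop d.length)).map (fun p => d ++ p) := by
  intro fuel
  induction fuel with
  | zero =>
    intro s acc hs hlen
    have : s = [] := List.eq_nil_of_length_eq_zero (Nat.le_zero.mp hlen)
    subst this
    exact absurd (List.prefix_nil.mp hs) hd
  | succ fuel ih =>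
    intro s acc hs hlen
    obtain ⟨v, rfl⟩ := hs
    have hdl : 0 < d.length := List.length_pos_iff.mpr hd
    rw [pvTailLoop]
    rw [PySem.Chars.findFrom_natCast (d ++ v) d d.length (by simp), List.drop_left]
    by_cases hv : PySem.Chars.find v d = -1
    · rw [if_pos (by rw [hv]; simp)]
      have hno : ∀ i, ¬ d <+: v.drop i := fun i hpre =>
        ((PySem.Chars.find_eq_neg_one_iff v d).mp hv) (hpre.isInfix.trans (List.drop_suffix i v).isInfix)
      rw [pvSplit_no_occ d hd v hno]
      simp
    · have h0 : 0 ≤ PySem.Chars.find v d := by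
        have := PySem.Chars.neg_one_le_find v d
        omega
      have hspec := PySem.Chars.find_spec (s := v) (sub := d) h0
      rw [if_neg (by rw [if_neg hv]; omega)]
      rw [if_neg hv]
      have htn : ((d.length : Int) + PySem.Chars.find v d).toNat
          = d.length + (PySem.Chars.find v d).toNat := by omega
      rw [htn]
      set m := (PySem.Chars.find v d).toNat with hm
      rw [List.take_length_add_append, List.drop_length_add_append]
      have hlen' : (v.drop m).length ≤ fuel := by
        simp only [List.length_drop, List.length_append] at *
        omega
      rw [ih (v.drop m) _ hspec.1 hlen']
      rw [pvSplit_occ d hd m v hspec.1 hspec.2]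
      rw [List.drop_drop]
      simp [Nat.add_comm m d.length]

lemma pvFoldA (d : List Char) :
    ∀ (ps : List (List Char)) (n : Nat) (acc : List String), n ≠ 0 →
      (ps.zipIdx n).foldl (fun res pi =>
        if pi.2 = 0 then
          (if PySem.Chars.strip pi.1 ≠ [] then res ++ [String.ofList pi.1] else res)
        else
          (let combined := d ++ pi.1
           if PySem.Chars.strip combined ≠ [] then res ++ [String.ofList combined] else res)) acc
      = acc ++ (ps.filter (fun p => decide (PySem.Chars.strip (d ++ p) ≠ []))).map
            (fun p => String.ofList (d ++ p)) := by
  intro ps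
  induction ps with
  | nil => intro n acc _; simp
  | cons p ps ih =>
    intro n acc hn
    rw [List.zipIdx_cons, List.foldl_cons]
    simp only [if_neg hn]
    rw [ih (n + 1) _ (by omega)]
    by_cases hb : PySem.Chars.strip (d ++ p) ≠ []
    · rw [if_pos hb, List.filter_cons_of_pos (by simpa using hb)]
      simp
    · rw [if_neg hb, List.filter_cons_of_neg (by simpa using hb)]

lemma pvNB (x : List Char) : (!(PySem.Chars.strip x).isEmpty) = decide (PySem.Chars.strip x ≠ []) := by
  cases h : PySem.Chars.strip x <;> simp

-- ===== VERDICT (by name: the statement is the Claim_ definition above) =====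
theorem split_with_delimiter_py_spec : Claim_equal_split_with_delimiter_py := by
  intro text delimiter _ hpre
  unfold Spec_split_with_delimiter_py
  have hd : delimiter.toList ≠ [] := by
    simpa [String.toList_eq_nil_iff] using hpre
  simp only [split_with_delimiter_py, split_with_delimiter_py_alt]
  by_cases hk : PySem.Chars.find text.toList delimiter.toList = -1
  · have hii : PySem.Chars.isIn delimiter.toList text.toList = false := by
      simp [PySem.Chars.isIn, hk]
    rw [if_pos hii, if_pos hk]
  · have h0 : 0 ≤ PySem.Chars.find text.toList delimiter.toList := by
      have := PySem.Chars.neg_one_le_find text.toList delimiter.toList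
      omega
    have hii : ¬ PySem.Chars.isIn delimiter.toList text.toList = false := by
      simp [PySem.Chars.isIn, hk]
    have hspec := PySem.Chars.find_spec (s := text.toList) (sub := delimiter.toList) h0
    set t := text.toList
    set d := delimiter.toList
    set k := (PySem.Chars.find t d).toNat with hkdef
    rw [if_neg hii, if_neg hk]
    have hsplit? : PySem.Chars.split? t d = some (PySem.Chars.splitOn t d) := by
      simp [PySem.Chars.split?, List.isEmpty_eq_false_iff.mpr hd]
    rw [hsplit?]
    simp only []
    rw [pvSplit_eq_splitOn d hd t, pvSplit_occ d hd k t hspec.1 hspec.2]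
    rw [List.zipIdx_cons, List.foldl_cons]
    rw [pvFoldA d _ 1 _ one_ne_zero]
    -- B side
    rw [pvTailLoop_eq d hd (t.drop k).length (t.drop k) [t.take k] hspec.1 (le_refl _)]
    rw [List.drop_drop]
    by_cases hb : PySem.Chars.strip (t.take k) = [] <;>
      simp [hb, List.filter_map, Function.comp_def, List.map_map, pvNB]
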